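-- pv_equiv track=rewrite | github.com/ychanc2104/LeetCode | Maximum Split of Positive Even Integers.py | maximumEvenSplit2
-- ===== SOURCE A (Python) =====
-- def maximumEvenSplit2(n: int):
--     if n & 1: return []
--     res = []
--     for i in range(1,n//2+1):
--         if n - 2*i >= 0:
--             res.append(2*i)
--             n -= 2*i
--         else: # append remaining
--             res[-1] += n
--             return res
--     return res
-- ===== SOURCE B (Python) =====
-- def maximumEvenSplit2(n: int):
--     # closed-form split: k = largest k with k*(k+1) <= n; answer is 2,4,...,2k with the remainder folded into the last term
--     if n % 2 or n <= 0:
--         return []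
--     k = 1
--     while (k + 1) * (k + 2) <= n:
--         k += 1
--     res = [2 * j for j in range(1, k + 1)]
--     res[-1] += n - k * (k + 1)
--     return res
-- ===== Notes on version B (the rewrite author's own statement) =====
-- stated objective: alternative
-- what changed: Replaces A's accumulate-and-subtract loop with early-return patching by a closed-form construction: find the number of terms k (largest k with k*(k+1) <= n) with an O(sqrt n) counter loop, build the list 2..2k as a comprehension, and fold the remainder n-k*(k+1) into the last term.
import Mathlib
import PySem

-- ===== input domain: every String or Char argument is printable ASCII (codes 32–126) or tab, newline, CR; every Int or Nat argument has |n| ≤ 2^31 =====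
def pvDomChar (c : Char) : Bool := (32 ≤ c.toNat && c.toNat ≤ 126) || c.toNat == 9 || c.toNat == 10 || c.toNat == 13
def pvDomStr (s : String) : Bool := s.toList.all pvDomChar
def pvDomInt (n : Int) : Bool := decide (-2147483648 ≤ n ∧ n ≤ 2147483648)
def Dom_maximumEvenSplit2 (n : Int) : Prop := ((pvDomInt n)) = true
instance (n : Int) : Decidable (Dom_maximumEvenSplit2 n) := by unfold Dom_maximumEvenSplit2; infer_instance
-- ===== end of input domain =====

-- B replaces A's accumulate-and-subtract loop (with its early-return remainder patch) by a closed-form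
-- construction: find the term count k with a counter loop, build [2,4,...,2k], fold the remainder into
-- the last element.  Same cost class; the objective is an alternative, plainer decomposition.

-- ===== PORT A =====
-- Loop body of "for i in range(1, n//2+1)": m counts remaining iterations (the range is computed once,
-- before n starts mutating); the Python early 'return' is the else branch.  'res[-1] += n' is only
-- ever reached with res ≠ [] (i = 1 always takes the first branch), so dropLast/getLastD is exact
-- wherever the Python returns.
def pvGoA : Nat → Int → Int → List Int → List Int
  | 0, _, _, res => res
  | m+1, i, n, res =>
    if n - 2*i ≥ 0 then pvGoA m (i+1) (n - 2*i) (res ++ [2*i])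
    else res.dropLast ++ [res.getLastD 0 + n]

def maximumEvenSplit2 (n : Int) : List Int :=
  if PySem.Int.band n 1 = 1 then []
  else pvGoA (PySem.Int.floordiv n 2).toNat 1 n []

-- ===== PORT B =====
-- while (k+1)*(k+2) <= n: k += 1
def pvFindK (n : Int) (k : Int) : Int :=
  if h : (k+1)*(k+2) ≤ n then pvFindK n (k+1) else k
termination_by (n - k).toNat
decreasing_by
  have hk : k < n := by nlinarith [sq_nonneg (k+1)]
  omega

def maximumEvenSplit2_alt (n : Int) : List Int :=
  if PySem.Int.mod n 2 ≠ 0 ∨ n ≤ 0 then []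
  else
    let k := pvFindK n 1
    let res := (PySem.List.pyRange 1 (k+1) 1).map (fun j => 2*j)
    res.dropLast ++ [res.getLastD 0 + (n - k*(k+1))]

-- ===== PRECONDITION & SPEC =====
def Spec_maximumEvenSplit2 (n : Int) (out : List Int) : Prop := out = maximumEvenSplit2_alt n
instance (n : Int) (out : List Int) : Decidable (Spec_maximumEvenSplit2 n out) := by unfold Spec_maximumEvenSplit2; infer_instance

-- ===== CLAIM (what is proved, stated in full; the proofs are below) =====
def Claim_equal_maximumEvenSplit2 : Prop := ∀ (n : Int), Dom_maximumEvenSplit2 n → Spec_maximumEvenSplit2 n (maximumEvenSplit2 n)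

-- ===== LEMMAS AND PROOFS =====

-- the even segment [2*i, 2*(i+1), ..., 2*(i+c-1)]
def pvSeg (i : Int) (c : Nat) : List Int := (List.range c).map (fun j : Nat => 2*(i + (j : Int)))

theorem pvSeg_cons (i : Int) (c : Nat) :
    pvSeg i (c+1) = 2*i :: pvSeg (i+1) c := by
  simp only [pvSeg, List.range_succ_eq_map, List.map_cons, List.map_map]
  refine List.cons_eq_cons.mpr ⟨by norm_num, List.map_congr_left fun a _ => ?_⟩
  simp only [Function.comp_apply]
  push_cast
  ring

theorem pvSeg_snoc (i : Int) (c : Nat) :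
    pvSeg i (c+1) = pvSeg i c ++ [2*(i + c)] := by
  simp [pvSeg, List.range_succ]

theorem pvFindK_ge (n k : Int) : k ≤ pvFindK n k := by
  fun_induction pvFindK with
  | case1 k h ih => omega
  | case2 k h => omega

theorem pvFindK_not_lt (n k : Int) :
    ¬ ((pvFindK n k + 1) * (pvFindK n k + 2) ≤ n) := by
  fun_induction pvFindK with
  | case1 k h ih => exact ih
  | case2 k h => simpa using h

theorem pvFindK_le (n k : Int) :
    pvFindK n k = k ∨ pvFindK n k * (pvFindK n k + 1) ≤ n := by
  fun_induction pvFindK with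
  | case1 k h ih =>
    rcases ih with h1 | h1
    · right; rw [h1]; nlinarith
    · right; exact h1
  | case2 k h => left; rfl

theorem pvFindK_eq_self (n k : Int) (h : ¬ ((k+1)*(k+2) ≤ n)) : pvFindK n k = k := by
  rw [pvFindK]; simp [h]

theorem pvFindK_step (n k : Int) (h : (k+1)*(k+2) ≤ n) : pvFindK n k = pvFindK n (k+1) := by
  rw [pvFindK]; simp [h]

-- loop characterisation: run A's loop from index i with the invariant state (c more full steps to go)
theorem pvGoA_eq (n : Int) : ∀ (c : Nat) (i : Int) (m : Nat) (res : List Int),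
    1 ≤ i → i*(i+1) ≤ n → pvFindK n i = i + c → c + 2 ≤ m →
    pvGoA m i (n - i*(i-1)) res = res ++ pvSeg i c ++ [2*(i + c) + (n - (i + c)*(i + c + 1))] := by
  intro c
  induction c with
  | zero =>
    intro i m res hi hle hfk hm
    have hnot : ¬ ((i+1)*(i+2) ≤ n) := by
      have := pvFindK_not_lt n i
      rw [hfk] at this; simpa using this
    obtain ⟨m1, rfl⟩ : ∃ m1, m = m1 + 2 := ⟨m - 2, by omega⟩
    rw [show m1 + 2 = (m1 + 1) + 1 from rfl, pvGoA]
    have hc1 : n - i*(i-1) - 2*i ≥ 0 := by nlinarith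
    rw [if_pos hc1, pvGoA]
    have hc2 : ¬ (n - i*(i-1) - 2*i - 2*(i+1) ≥ 0) := by nlinarith
    rw [if_neg hc2]
    rw [List.dropLast_concat, List.getLastD_concat]
    simp [pvSeg]
    ring
  | succ c ih =>
    intro i m res hi hle hfk hm
    have hstep : (i+1)*(i+2) ≤ n := by
      by_contra h
      have := pvFindK_eq_self n i h
      omega
    have hstep' : (i+1)*((i+1)+1) ≤ n := by
      have h := hstep; ring_nf at h ⊢; exact h
    obtain ⟨m1, rfl⟩ : ∃ m1, m = m1 + 1 := ⟨m - 1, by omega⟩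
    rw [pvGoA]
    have hc1 : n - i*(i-1) - 2*i ≥ 0 := by nlinarith
    rw [if_pos hc1]
    have hfk' : pvFindK n (i+1) = (i+1) + c := by
      rw [← pvFindK_step n i hstep, hfk]; push_cast; ring
    have hrec := ih (i+1) m1 (res ++ [2*i]) (by omega) hstep' hfk' (by omega)
    rw [show n - i*(i-1) - 2*i = n - (i+1)*((i+1)-1) by ring, hrec, pvSeg_cons]
    have hcast : (i+1) + (c:Int) = i + ((c+1 : Nat) : Int) := by push_cast; ring
    rw [hcast]
    simp

-- main equality for even n ≥ 4 (n = 2 and n ≤ 0 are handled separately)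
theorem pv_even_ge4 (n : Int) (hev : (2:Int) ∣ n) (h4 : 4 ≤ n) :
    maximumEvenSplit2 n = maximumEvenSplit2_alt n := by
  have hmod : PySem.Int.mod n 2 = 0 := (PySem.Int.mod_eq_zero_iff_dvd n 2).mpr hev
  have hband : PySem.Int.band n 1 = 0 := by rw [PySem.Int.band_one]; exact hmod
  have hk1 : 1 ≤ pvFindK n 1 := pvFindK_ge n 1
  have hkle : pvFindK n 1 * (pvFindK n 1 + 1) ≤ n := by
    rcases pvFindK_le n 1 with h | h
    · rw [h]; omega
    · exact h
  have hknot : ¬ ((pvFindK n 1 + 1) * (pvFindK n 1 + 2) ≤ n) := pvFindK_not_lt n 1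
  obtain ⟨c, hc⟩ : ∃ c : Nat, pvFindK n 1 = 1 + c := ⟨(pvFindK n 1 - 1).toNat, by omega⟩
  have hfd : PySem.Int.floordiv n 2 = n / 2 := PySem.Int.floordiv_eq_ediv_of_pos (by omega)
  have h2k : 2*(pvFindK n 1 + 1) ≤ n := by
    rcases lt_or_ge (pvFindK n 1) 2 with h | h
    · have : pvFindK n 1 = 1 := by omega
      omega
    · nlinarith
  have hm : c + 2 ≤ (PySem.Int.floordiv n 2).toNat := by
    rw [hfd]; omega
  have hA : maximumEvenSplit2 n
      = pvSeg 1 c ++ [2*((1:Int) + c) + (n - ((1:Int) + c)*((1:Int) + c + 1))] := by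
    rw [maximumEvenSplit2, if_neg (by rw [hband]; decide)]
    have := pvGoA_eq n c 1 (PySem.Int.floordiv n 2).toNat [] (by omega) (by omega) hc hm
    rw [show n - 1*((1:Int)-1) = n by ring] at this
    simpa using this
  have hB : maximumEvenSplit2_alt n
      = pvSeg 1 c ++ [2*((1:Int) + c) + (n - ((1:Int) + c)*((1:Int) + c + 1))] := by
    rw [maximumEvenSplit2_alt, if_neg (by push Not; exact ⟨hmod, by omega⟩)]
    have hres : (PySem.List.pyRange 1 (pvFindK n 1 + 1) 1).map (fun j => 2*j) = pvSeg 1 (c+1) := by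
      apply List.ext_getElem
      · simp [PySem.List.length_pyRange_one, pvSeg]; omega
      · intro idx hi1 hi2
        simp only [List.getElem_map, PySem.List.getElem_pyRange_one]
        simp [pvSeg]
    simp only [hres]
    rw [pvSeg_snoc, List.dropLast_concat, List.getLastD_concat, hc]
  rw [hA, hB]

-- ===== VERDICT (by name: the statement is the Claim_ definition above) =====
theorem maximumEvenSplit2_spec : Claim_equal_maximumEvenSplit2 := by
  intro n _
  unfold Spec_maximumEvenSplit2
  by_cases hev : (2:Int) ∣ n
  · rcases lt_or_ge n 4 with hlt | hge
    · -- even n < 4: n ≤ 0 gives [] on both sides; n = 2 by direct computation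
      have hmod : PySem.Int.mod n 2 = 0 := (PySem.Int.mod_eq_zero_iff_dvd n 2).mpr hev
      have hband : PySem.Int.band n 1 = 0 := by rw [PySem.Int.band_one]; exact hmod
      rcases lt_or_ge n 2 with h0 | h2
      · have hn0 : n ≤ 0 := by omega
        rw [maximumEvenSplit2, if_neg (by rw [hband]; decide),
            maximumEvenSplit2_alt, if_pos (Or.inr hn0)]
        have hz : (PySem.Int.floordiv n 2).toNat = 0 := by
          rw [PySem.Int.floordiv_eq_ediv_of_pos (by omega)]; omega
        rw [hz, pvGoA]
      · have hn2 : n = 2 := by omega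
        subst hn2
        have hk2 : pvFindK 2 1 = 1 := pvFindK_eq_self 2 1 (by norm_num)
        rw [maximumEvenSplit2, if_neg (by decide),
            maximumEvenSplit2_alt, if_neg (by decide)]
        simp only [hk2]
        decide
    · exact pv_even_ge4 n hev hge
  · -- odd n: both return []
    have hmod : PySem.Int.mod n 2 = 1 := by
      have h0 : PySem.Int.mod n 2 ≠ 0 := fun h => hev ((PySem.Int.mod_eq_zero_iff_dvd n 2).mp h)
      have hge0 := PySem.Int.mod_nonneg n (b := 2) (by omega)
      have hlt2 := PySem.Int.mod_lt n (b := 2) (by omega)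
      omega
    rw [maximumEvenSplit2, if_pos (by rw [PySem.Int.band_one]; exact hmod),
        maximumEvenSplit2_alt, if_pos (Or.inl (by omega))]
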